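-- pv_equiv track=rewrite | github.com/matheusvictor/estudos_python | ciandt_next_gen_2022/desafio_05.py | calculadistanciabandapercorre
-- ===== SOURCE A (Python) =====
-- def calculadistanciabandapercorre(numerorodadaensaios, numeroshows):
--     matriz_ensaios = [
--         # a   b    c     d    e    f
--         [0, 500, 500, 1000, 500, 250],  # a
--         [500, 0, 500, 1000, 500, 750],  # b
--         [500, 500, 0, 500, 500, 750],  # c
--         [1000, 1000, 500, 0, 500, 750],  # d
--         [500, 500, 500, 500, 0, 250],  # e
--         [250, 750, 750, 750, 250, 0]  # f
--     ]
--
--     total_distancia_ensaios = 0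
--
--     for integrante in matriz_ensaios:
--         for distancia_ensaio in integrante:
--             total_distancia_ensaios += distancia_ensaio
--
--     total_distancia_ensaios *= numerorodadaensaios
--     total_distancia_ensaios *= 2  # considerando ida e volta.
--
--     matriz_shows = [750, 1250, 1250, 750, 750, 500]  # pub
--
--     total_distancia_show = 0
--
--     for distancia_show in matriz_shows:
--         total_distancia_show += distancia_show
--
--     total_distancia_show *= numeroshows
--     total_distancia_show *= 2  # considerando ida e volta.
--
--     return (total_distancia_ensaios + total_distancia_show)
-- ===== SOURCE B (Python) =====
-- def calculadistanciabandapercorre(numerorodadaensaios, numeroshows):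
--     # Closed form: matrix total 17500, show list total 5250, each doubled for round trips.
--     return 35000 * numerorodadaensaios + 10500 * numeroshows
-- ===== Notes on version B (the rewrite author's own statement) =====
-- stated objective: simpler
-- what changed: Replaced the two constant-table summation loops by the closed form 35000*numerorodadaensaios + 10500*numeroshows (matrix sum 17500 and list sum 5250, each doubled).
import Mathlib
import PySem

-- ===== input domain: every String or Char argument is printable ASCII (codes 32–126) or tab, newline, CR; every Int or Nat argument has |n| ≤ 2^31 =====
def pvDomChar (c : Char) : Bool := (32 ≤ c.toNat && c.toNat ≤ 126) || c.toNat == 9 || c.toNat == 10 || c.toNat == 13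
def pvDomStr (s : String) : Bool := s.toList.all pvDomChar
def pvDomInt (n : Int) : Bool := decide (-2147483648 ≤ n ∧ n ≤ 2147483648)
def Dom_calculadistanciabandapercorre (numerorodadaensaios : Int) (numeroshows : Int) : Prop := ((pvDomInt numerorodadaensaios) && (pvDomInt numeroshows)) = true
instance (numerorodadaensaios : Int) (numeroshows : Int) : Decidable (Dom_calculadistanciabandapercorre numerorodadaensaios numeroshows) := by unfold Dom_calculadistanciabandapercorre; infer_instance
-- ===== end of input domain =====

-- B replaces the constant-table loops by the closed form 35000*ensaios + 10500*shows (simpler).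


-- ===== PORT A =====
-- Port of A: fold over the literal tables, same accumulation order.
def calculadistanciabandapercorre (numerorodadaensaios : Int) (numeroshows : Int) : Int :=
  let matriz_ensaios : List (List Int) :=
    [[0, 500, 500, 1000, 500, 250],
     [500, 0, 500, 1000, 500, 750],
     [500, 500, 0, 500, 500, 750],
     [1000, 1000, 500, 0, 500, 750],
     [500, 500, 500, 500, 0, 250],
     [250, 750, 750, 750, 250, 0]]
  let total_distancia_ensaios : Int :=
    matriz_ensaios.foldl (fun acc integrante => integrante.foldl (· + ·) acc) 0
  let total_distancia_ensaios := total_distancia_ensaios * numerorodadaensaios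
  let total_distancia_ensaios := total_distancia_ensaios * 2
  let matriz_shows : List Int := [750, 1250, 1250, 750, 750, 500]
  let total_distancia_show : Int := matriz_shows.foldl (· + ·) 0
  let total_distancia_show := total_distancia_show * numeroshows
  let total_distancia_show := total_distancia_show * 2
  total_distancia_ensaios + total_distancia_show

-- ===== PORT B =====
-- Port of B: the closed form.
def calculadistanciabandapercorre_alt (numerorodadaensaios : Int) (numeroshows : Int) : Int :=
  35000 * numerorodadaensaios + 10500 * numeroshows

-- ===== PRECONDITION & SPEC =====
def Spec_calculadistanciabandapercorre (numerorodadaensaios : Int) (numeroshows : Int) (out : Int) : Prop := out = calculadistanciabandapercorre_alt numerorodadaensaios numeroshows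
instance (numerorodadaensaios : Int) (numeroshows : Int) (out : Int) : Decidable (Spec_calculadistanciabandapercorre numerorodadaensaios numeroshows out) := by unfold Spec_calculadistanciabandapercorre; infer_instance

-- ===== CLAIM (what is proved, stated in full; the proofs are below) =====
def Claim_equal_calculadistanciabandapercorre : Prop := ∀ (numerorodadaensaios : Int) (numeroshows : Int), Dom_calculadistanciabandapercorre numerorodadaensaios numeroshows → Spec_calculadistanciabandapercorre numerorodadaensaios numeroshows (calculadistanciabandapercorre numerorodadaensaios numeroshows)

-- ===== LEMMAS AND PROOFS =====

-- ===== VERDICT (by name: the statement is the Claim_ definition above) =====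
theorem calculadistanciabandapercorre_spec : Claim_equal_calculadistanciabandapercorre := by
  intro e s _
  unfold Spec_calculadistanciabandapercorre calculadistanciabandapercorre calculadistanciabandapercorre_alt
  simp [List.foldl]
  ring
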